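-- pv_equiv track=rewrite | github.com/hjylha/krypto | krypto.py | get_matching_words
-- ===== SOURCE A (Python) =====
-- def does_word_match(word, codeword):
--     if len(word) != len(codeword):
--         return False
--     for i, chars in enumerate(zip(word, codeword)):
--         char, char_r = chars
--         for char_prev, char_r_prev in zip(word[:i], codeword[:i]):
--             if char_r == char_r_prev and char != char_prev:
--                 return False
--             if char_r == char_r_prev and char == char_prev:
--                 break
--             if char_r != char_r_prev and char == char_prev:
--                 return False
--     return True
--
-- def get_matching_words(codeword, wordlist, maximum_matched_words=None):
--     if not wordlist:
--         return []
--     matched_words = []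
--     if maximum_matched_words is not None:
--         for word in wordlist:
--             if does_word_match(word, codeword):
--                 matched_words.append(word)
--                 if len(matched_words) > maximum_matched_words:
--                     return matched_words
--         return matched_words
--     for word in wordlist:
--         if does_word_match(word, codeword):
--             matched_words.append(word)
--     return matched_words
-- ===== SOURCE B (Python) =====
-- def get_matching_words(codeword, wordlist, maximum_matched_words=None):
--     def pattern(s):
--         return [s.index(c) for c in s]
--     pat = pattern(codeword)
--     matched = [w for w in wordlist if pattern(w) == pat]
--     if maximum_matched_words is None:
--         return matched
--     return matched[:maximum_matched_words]
-- ===== Notes on version B (the rewrite author's own statement) =====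
-- stated objective: simpler
-- what changed: Replaces the nested compare-against-every-earlier-position loop with break/early-return by pattern normalization (each word mapped to its list of first-occurrence indices, kept when it equals the codeword's pattern computed once), with the limit applied as one plain slice; Pre_ excludes a negative maximum_matched_words when some word matches, a corner no caller would specify, where A's single-word result and B's drop-from-the-end slice are both accidents of loop/slice mechanics.
-- intended difference: When maximum_matched_words = m >= 0 and more than m words match, A returns m+1 matches (its 'len > maximum' check fires one append too late) while B returns exactly m, which is what a maximum of m means. — e.g. on get_matching_words("ab", (["cd", "ef"], some 1)): A returns ["cd", "ef"], B returns ["cd"]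
-- outside the precondition, e.g. on get_matching_words('ab', ['cd'], -1): A returns ['cd'], B returns []
import Mathlib
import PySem

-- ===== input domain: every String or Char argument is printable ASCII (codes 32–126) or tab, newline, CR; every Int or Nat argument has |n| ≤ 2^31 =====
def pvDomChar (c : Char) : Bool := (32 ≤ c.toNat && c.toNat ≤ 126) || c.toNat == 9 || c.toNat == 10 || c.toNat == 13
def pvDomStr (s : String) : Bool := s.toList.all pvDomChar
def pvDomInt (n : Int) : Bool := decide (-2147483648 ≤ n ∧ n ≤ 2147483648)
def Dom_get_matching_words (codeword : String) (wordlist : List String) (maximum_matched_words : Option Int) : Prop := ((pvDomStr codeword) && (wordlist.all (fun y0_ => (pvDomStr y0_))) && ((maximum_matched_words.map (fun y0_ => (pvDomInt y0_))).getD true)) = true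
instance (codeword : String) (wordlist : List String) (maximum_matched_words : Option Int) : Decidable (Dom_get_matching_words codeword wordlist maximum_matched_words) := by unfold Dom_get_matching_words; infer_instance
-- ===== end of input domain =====

-- B replaces A's nested compare-with-every-earlier-position loop (with break / early
-- return) by first-occurrence-index pattern normalization, a filter and one plain slice;
-- objective: simpler. Outside D_ (limit reached) the RETURN values are proved equal.

-- ===== PORT A =====
-- inner 'for char_prev, char_r_prev in zip(word[:i], codeword[:i])' loop of does_word_match;
-- returns false = 'return False' from the function, true = loop ended or 'break'
def pvInner (ch chr : Char) : List (Char × Char) → Bool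
  | [] => true
  | (cp, crp) :: rest =>
    if chr = crp ∧ ch ≠ cp then false
    else if chr = crp ∧ ch = cp then true          -- break
    else if chr ≠ crp ∧ ch = cp then false
    else pvInner ch chr rest

-- outer 'for i, chars in enumerate(zip(word, codeword))' loop of does_word_match
-- (word[:i] = take i.toNat: the enumerate index i is ≥ 0, where Python's slice clamps like take)
def pvOuter (w c : List Char) : List (Int × Char × Char) → Bool
  | [] => true
  | (i, ch, chr) :: rest =>
    if pvInner ch chr ((w.take i.toNat).zip (c.take i.toNat)) then pvOuter w c rest
    else false

def does_word_match (word codeword : String) : Bool :=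
  if PySem.Str.len word ≠ PySem.Str.len codeword then false
  else pvOuter word.toList codeword.toList
    (PySem.List.enumerate (word.toList.zip codeword.toList))

-- 'maximum is not None' branch loop of get_matching_words
def pvLoopMax (cw : String) (m : Int) (matched : List String) : List String → List String
  | [] => matched
  | w :: ws =>
    if does_word_match w cw then
      let matched' := matched ++ [w]
      if (matched'.length : Int) > m then matched' else pvLoopMax cw m matched' ws
    else pvLoopMax cw m matched ws

-- 'maximum is None' branch loop of get_matching_words
def pvLoopAll (cw : String) (matched : List String) : List String → List String
  | [] => matched
  | w :: ws =>
    if does_word_match w cw then pvLoopAll cw (matched ++ [w]) ws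
    else pvLoopAll cw matched ws

def get_matching_words (codeword : String) (wordlist : List String) (maximum_matched_words : Option Int) : List String :=
  if wordlist = [] then []
  else
    match maximum_matched_words with
    | some m => pvLoopMax codeword m [] wordlist
    | none => pvLoopAll codeword [] wordlist

-- ===== PORT B =====
-- pattern(s) = [s.index(c) for c in s]; c always occurs in s, so .index never raises
-- (getD 0 is never used) and the one-char substring index equals the char index
def pvPattern (s : List Char) : List Nat :=
  s.map (fun c => (PySem.List.index? s c).getD 0)

def get_matching_words_alt (codeword : String) (wordlist : List String) (maximum_matched_words : Option Int) : List String :=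
  let pat := pvPattern codeword.toList
  let matched := wordlist.filter (fun w => pvPattern w.toList == pat)
  match maximum_matched_words with
  | none => matched
  | some m => PySem.List.slice matched none (some m)   -- matched[:m]

-- ===== PRECONDITION & SPEC =====
-- decidable 'word matches codeword' used only to delimit Pre_ and D_: positions carry equal
-- letters in the word exactly where they do in the codeword (independent of both ports' code)
def pvSameShape (u v : List Char) : Bool :=
  (u.length == v.length) &&
    (List.range u.length).all (fun i => (List.range i).all (fun j =>
      decide (u[j]! = u[i]!) == decide (v[j]! = v[i]!)))

-- Pre_ excludes a negative maximum_matched_words when some word matches, a corner no caller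
-- would specify, where A's single-word result and B's drop-from-the-end slice are both
-- accidents of loop/slice mechanics (with no matching word both programs return []).
def Pre_get_matching_words (codeword : String) (wordlist : List String) (maximum_matched_words : Option Int) : Prop :=
  0 ≤ maximum_matched_words.getD 0 ∨
    wordlist.countP (fun w => pvSameShape w.toList codeword.toList) = 0
instance (codeword : String) (wordlist : List String) (maximum_matched_words : Option Int) : Decidable (Pre_get_matching_words codeword wordlist maximum_matched_words) := by unfold Pre_get_matching_words; infer_instance

def pvWitness_get_matching_words : String × List String × Option Int := ("ab", (["cd", "ab", "aa"], some 2))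

-- When maximum_matched_words = m ≥ 0 and more than m words match, A returns m+1 matches
-- (its 'len > maximum' check fires one append too late) while B returns exactly m,
-- which is what a maximum of m means.
def D_get_matching_words (codeword : String) (wordlist : List String) (maximum_matched_words : Option Int) : Prop :=
  maximum_matched_words ≠ none ∧ 0 ≤ maximum_matched_words.getD 0 ∧
    maximum_matched_words.getD 0 <
      (wordlist.countP (fun w => pvSameShape w.toList codeword.toList) : Int)
instance (codeword : String) (wordlist : List String) (maximum_matched_words : Option Int) : Decidable (D_get_matching_words codeword wordlist maximum_matched_words) := by unfold D_get_matching_words; infer_instance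

def Spec_get_matching_words (codeword : String) (wordlist : List String) (maximum_matched_words : Option Int) (out : List String) : Prop := ¬ D_get_matching_words codeword wordlist maximum_matched_words → out = get_matching_words_alt codeword wordlist maximum_matched_words
instance (codeword : String) (wordlist : List String) (maximum_matched_words : Option Int) (out : List String) : Decidable (Spec_get_matching_words codeword wordlist maximum_matched_words out) := by unfold Spec_get_matching_words; infer_instance

def pvDiffWitness_get_matching_words : String × List String × Option Int := ("ab", (["cd", "ef"], some 1))
def pvDiffWitnessOut_get_matching_words : (List String) × (List String) := (["cd", "ef"], ["cd"])

-- ===== CLAIM (what is proved, stated in full; the proofs are below) =====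
def Claim_unchanged_get_matching_words : Prop := ∀ (codeword : String) (wordlist : List String) (maximum_matched_words : Option Int), Dom_get_matching_words codeword wordlist maximum_matched_words → Pre_get_matching_words codeword wordlist maximum_matched_words → Spec_get_matching_words codeword wordlist maximum_matched_words (get_matching_words codeword wordlist maximum_matched_words)
def Claim_changed_get_matching_words : Prop := Dom_get_matching_words (pvDiffWitness_get_matching_words.1) (pvDiffWitness_get_matching_words.2.1) (pvDiffWitness_get_matching_words.2.2) ∧ Pre_get_matching_words (pvDiffWitness_get_matching_words.1) (pvDiffWitness_get_matching_words.2.1) (pvDiffWitness_get_matching_words.2.2) ∧ D_get_matching_words (pvDiffWitness_get_matching_words.1) (pvDiffWitness_get_matching_words.2.1) (pvDiffWitness_get_matching_words.2.2) ∧ get_matching_words (pvDiffWitness_get_matching_words.1) (pvDiffWitness_get_matching_words.2.1) (pvDiffWitness_get_matching_words.2.2) = pvDiffWitnessOut_get_matching_words.1 ∧ get_matching_words_alt (pvDiffWitness_get_matching_words.1) (pvDiffWitness_get_matching_words.2.1) (pvDiffWitness_get_matching_words.2.2) = pvDiffWitnessOut_get_matching_words.2 ∧ pvDiffWitnessOut_get_matching_words.1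 ≠ pvDiffWitnessOut_get_matching_words.2
def Claim_exact_get_matching_words : Prop := ∀ (codeword : String) (wordlist : List String) (maximum_matched_words : Option Int), Dom_get_matching_words codeword wordlist maximum_matched_words → Pre_get_matching_words codeword wordlist maximum_matched_words → D_get_matching_words codeword wordlist maximum_matched_words → get_matching_words codeword wordlist maximum_matched_words ≠ get_matching_words_alt codeword wordlist maximum_matched_words

-- ===== LEMMAS AND PROOFS =====

-- the common characterization: positions j < i carry equal letters in the word iff they do in the codeword
def MatchRel (w cw : List Char) : Prop :=
  w.length = cw.length ∧ ∀ i, i < w.length → ∀ j, j < i → (w[j]! = w[i]! ↔ cw[j]! = cw[i]!)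

-- first-occurrence index
def pvFi (l : List Char) (i : Nat) : Nat := (PySem.List.index? l l[i]!).getD 0

theorem getBang_eq {α : Type} [Inhabited α] (l : List α) (i : Nat) (h : i < l.length) :
    l[i]! = l[i] := by
  simp [List.getElem!_eq_getElem?_getD, List.getElem?_eq_getElem h]

theorem pvFi_spec {l : List Char} {i : Nat} (hi : i < l.length) :
    pvFi l i ≤ i ∧ l[pvFi l i]! = l[i]! ∧ ∀ k, k < pvFi l i → l[k]! ≠ l[i]! := by
  have hx : l[i]! ∈ l := by rw [getBang_eq l i hi]; exact List.getElem_mem hi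
  obtain ⟨k, hk⟩ := Option.isSome_iff_exists.mp ((PySem.List.index?_isSome_iff l l[i]!).mpr hx)
  obtain ⟨hkl, hke, hkf⟩ := PySem.List.getElem_of_index?_eq_some hk
  have hfi : pvFi l i = k := by unfold pvFi; rw [hk]; rfl
  have hki : k ≤ i := by
    by_contra h
    exact hkf i (by omega) (getBang_eq l i hi).symm
  refine ⟨by omega, ?_, ?_⟩
  · rw [hfi, getBang_eq l k hkl]; exact hke
  · intro j hj
    rw [hfi] at hj
    rw [getBang_eq l j (by omega)]
    exact hkf j hj

theorem pvFi_congr {l : List Char} {i j : Nat} (h : l[i]! = l[j]!) : pvFi l i = pvFi l j := by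
  unfold pvFi; rw [h]

theorem pvFi_inj {l : List Char} {i j : Nat} (hi : i < l.length) (hj : j < l.length)
    (h : pvFi l i = pvFi l j) : l[i]! = l[j]! := by
  have si := pvFi_spec hi
  have sj := pvFi_spec hj
  rw [← si.2.1, ← sj.2.1, h]

theorem length_pattern (l : List Char) : (pvPattern l).length = l.length := by
  simp [pvPattern]

theorem pattern_getElem (l : List Char) (i : Nat) (hi : i < l.length) :
    (pvPattern l)[i]'(by simpa [length_pattern] using hi) = pvFi l i := by
  simp [pvPattern, pvFi, getBang_eq l i hi]

theorem pvFi_mono {w cw : List Char} (hlen : w.length = cw.length)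
    (hm : ∀ i, i < w.length → ∀ j, j < i → (cw[j]! = cw[i]! → w[j]! = w[i]!)) :
    ∀ i, i < w.length → pvFi w i ≤ pvFi cw i := by
  intro i hi
  have sc := pvFi_spec (l := cw) (i := i) (by omega)
  have sw := pvFi_spec (l := w) (i := i) hi
  rcases Nat.lt_or_ge (pvFi cw i) i with hk | hk
  · by_contra hgt
    exact sw.2.2 (pvFi cw i) (by omega) (hm i hi (pvFi cw i) hk sc.2.1)
  · omega

theorem pattern_eq_iff (w cw : List Char) :
    (pvPattern w = pvPattern cw) ↔ MatchRel w cw := by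
  constructor
  · intro h
    have hlen : w.length = cw.length := by
      have := congrArg List.length h
      simpa [length_pattern] using this
    have hfi : ∀ i, i < w.length → pvFi w i = pvFi cw i := by
      intro i hi
      rw [← pattern_getElem w i hi, ← pattern_getElem cw i (by omega)]
      exact List.getElem_of_eq h _
    refine ⟨hlen, ?_⟩
    intro i hi j hj
    constructor
    · intro hw
      exact pvFi_inj (by omega) (by omega)
        (by rw [← hfi j (by omega), ← hfi i hi]; exact pvFi_congr hw)
    · intro hc
      exact pvFi_inj (by omega) hi
        (by rw [hfi j (by omega), hfi i hi]; exact pvFi_congr hc)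
  · rintro ⟨hlen, hm⟩
    apply List.ext_getElem (by simp [length_pattern, hlen])
    intro i hi hi'
    rw [length_pattern] at hi
    rw [pattern_getElem w i hi, pattern_getElem cw i (by omega)]
    have h1 := pvFi_mono hlen (fun i hi j hj hc => (hm i hi j hj).mpr hc) i hi
    have h2 := pvFi_mono hlen.symm
      (fun i hi j hj hc => (hm i (by omega) j hj).mp hc) i (by omega)
    omega

theorem inner_iff (ch chr : Char) (ps : List (Char × Char)) :
    pvInner ch chr ps = true ↔
      ∀ k, k < ps.length → (∀ k', k' < k → (ps[k']!).2 ≠ chr) →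
        ((ps[k]!).2 = chr → (ps[k]!).1 = ch) ∧ ((ps[k]!).2 ≠ chr → (ps[k]!).1 ≠ ch) := by
  induction ps with
  | nil => simp [pvInner]
  | cons p rest ih =>
    rcases p with ⟨cp, crp⟩
    by_cases h1 : chr = crp <;> by_cases h2 : ch = cp
    · have hL : pvInner ch chr ((cp, crp) :: rest) = true := by simp [pvInner, h1, h2]
      rw [hL]
      constructor
      · intro _ k hk hpre
        match k with
        | 0 => simp only [List.getElem!_cons_zero]; exact ⟨fun _ => h2.symm, fun hne => absurd h1.symm hne⟩
        | k + 1 =>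
          have := hpre 0 (by omega)
          simp only [List.getElem!_cons_zero] at this
          exact absurd h1.symm this
      · intro _; rfl
    · have hL : pvInner ch chr ((cp, crp) :: rest) = false := by simp [pvInner, h1, h2]
      rw [hL]
      constructor
      · intro h; exact absurd h (by simp)
      · intro hr
        have := (hr 0 (by simp) (fun k' hk' => absurd hk' (Nat.not_lt_zero k'))).1
        simp only [List.getElem!_cons_zero] at this
        exact absurd (this h1.symm).symm h2
    · have hL : pvInner ch chr ((cp, crp) :: rest) = false := by simp [pvInner, h1, h2]
      rw [hL]
      constructor
      · intro h; exact absurd h (by simp)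
      · intro hr
        have := (hr 0 (by simp) (fun k' hk' => absurd hk' (Nat.not_lt_zero k'))).2
        simp only [List.getElem!_cons_zero] at this
        exact absurd h2.symm (this (fun hc => h1 hc.symm))
    · have hL : pvInner ch chr ((cp, crp) :: rest) = pvInner ch chr rest := by
        simp [pvInner, h1, h2]
      rw [hL, ih]
      constructor
      · intro hr k hk hpre
        match k with
        | 0 =>
          simp only [List.getElem!_cons_zero]
          exact ⟨fun hc => absurd hc.symm h1, fun _ hc => h2 hc.symm⟩
        | k + 1 =>
          have := hr k (by simpa using hk) (by
            intro k' hk'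
            have := hpre (k' + 1) (by omega)
            simpa using this)
          simpa using this
      · intro hr k hk hpre
        have := hr (k + 1) (by simpa using hk) (by
          intro k' hk'
          match k' with
          | 0 => simp only [List.getElem!_cons_zero]; exact fun hc => h1 hc.symm
          | k'' + 1 =>
            simp only [List.getElem!_cons_succ]
            exact hpre k'' (by omega))
        simpa using this

theorem outer_iff (w c : List Char) (l : List (Int × Char × Char)) :
    pvOuter w c l = true ↔
      ∀ p ∈ l, pvInner p.2.1 p.2.2 ((w.take p.1.toNat).zip (c.take p.1.toNat)) = true := by
  induction l with
  | nil => simp [pvOuter]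
  | cons p rest ih =>
    rcases p with ⟨i, ch, chr⟩
    by_cases h : pvInner ch chr ((w.take i.toNat).zip (c.take i.toNat)) = true
    · simp [pvOuter, h, ih]
    · simp [pvOuter, h]

-- row i of A's outer loop, as a condition on positions: what pvInner checks at index i
def pvRow (w cw : List Char) (i : Nat) : Prop :=
  ∀ j, j < i → (∀ j', j' < j → cw[j']! ≠ cw[i]!) →
    (cw[j]! = cw[i]! → w[j]! = w[i]!) ∧ (cw[j]! ≠ cw[i]! → w[j]! ≠ w[i]!)

theorem rows_to_match (w cw : List Char)
    (hR : ∀ i, i < w.length → pvRow w cw i) :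
    ∀ i, i < w.length → ∀ j, j < i → (w[j]! = w[i]! ↔ cw[j]! = cw[i]!) := by
  intro i
  induction i using Nat.strong_induction_on with
  | _ i IH =>
    intro hi j hj
    constructor
    · intro hw
      by_contra hc
      by_cases hex : ∃ k, k < j ∧ cw[k]! = cw[i]!
      · have hspec := Nat.find_spec hex
        set k0 := Nat.find hex with hk0
        have hmin : ∀ m, m < k0 → cw[m]! ≠ cw[i]! :=
          fun m hm hc => Nat.find_min hex hm ⟨by omega, hc⟩
        have hwk0 : w[k0]! = w[i]! :=
          (hR i hi k0 (by omega) hmin).1 hspec.2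
        have hk0j := (IH j hj (by omega) k0 hspec.1).mp (by rw [hwk0, ← hw])
        exact hc (by rw [← hk0j, hspec.2])
      · exact (hR i hi j hj (fun j' hj' hc' => hex ⟨j', hj', hc'⟩)).2 hc hw
    · intro hcw
      have hex : ∃ k, k ≤ j ∧ cw[k]! = cw[i]! := ⟨j, le_refl j, hcw⟩
      have hspec := Nat.find_spec hex
      set k0 := Nat.find hex with hk0
      have hmin : ∀ m, m < k0 → cw[m]! ≠ cw[i]! :=
        fun m hm hc => Nat.find_min hex hm ⟨by omega, hc⟩
      have hwk0 : w[k0]! = w[i]! :=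
        (hR i hi k0 (by omega) hmin).1 hspec.2
      rcases Nat.lt_or_ge k0 j with hlt | hge
      · have := (IH j hj (by omega) k0 hlt).mpr (by rw [hspec.2, hcw])
        rw [← this, hwk0]
      · have : k0 = j := by omega
        rw [← this, hwk0]

theorem match_to_rows (w cw : List Char)
    (hM : ∀ i, i < w.length → ∀ j, j < i → (w[j]! = w[i]! ↔ cw[j]! = cw[i]!)) :
    ∀ i, i < w.length → pvRow w cw i := by
  intro i hi j hj _
  exact ⟨fun hc => (hM i hi j hj).mpr hc, fun hc hw => hc ((hM i hi j hj).mp hw)⟩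

theorem inner_row (w cw : List Char) (k : Nat) (hk : k < w.length) (hk2 : k < cw.length) :
    (pvInner (w[k]!) (cw[k]!) ((w.take k).zip (cw.take k)) = true) ↔ pvRow w cw k := by
  rw [inner_iff]
  have hlen : ((w.take k).zip (cw.take k)).length = k := by simp; omega
  have hps : ∀ j, j < k → ((w.take k).zip (cw.take k))[j]! = (w[j]!, cw[j]!) := by
    intro j hj
    rw [getBang_eq _ j (by omega)]
    simp [List.getElem_zip, List.getElem_take,
      getBang_eq w j (by omega), getBang_eq cw j (by omega)]
  unfold pvRow
  constructor
  · intro h j hj hpre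
    have := h j (by omega) (by
      intro j' hj'
      rw [hps j' (by omega)]
      exact hpre j' hj')
    rw [hps j hj] at this
    exact this
  · intro h j hj hpre
    rw [hps j (by omega)]
    refine h j (by omega) ?_
    intro j' hj'
    have := hpre j' hj'
    rw [hps j' (by omega)] at this
    exact this

theorem dwm_iff (word codeword : String) :
    does_word_match word codeword = true ↔ MatchRel word.toList codeword.toList := by
  unfold does_word_match
  by_cases hlen : word.toList.length = codeword.toList.length
  · rw [if_neg (by simp only [PySem.Str.len_eq]; intro h; apply h; omega)]
    rw [outer_iff]
    have hzlen : (word.toList.zip codeword.toList).length = word.toList.length := by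
      rw [List.length_zip, hlen, min_self]
    have key : (∀ p ∈ PySem.List.enumerate (word.toList.zip codeword.toList),
        pvInner p.2.1 p.2.2 ((word.toList.take p.1.toNat).zip (codeword.toList.take p.1.toNat)) = true) ↔
        ∀ k, k < word.toList.length → pvRow word.toList codeword.toList k := by
      constructor
      · intro h k hk
        have hmem : ((0 : Int) + (k : Nat), (word.toList.zip codeword.toList)[k]'(by omega)) ∈
            PySem.List.enumerate (word.toList.zip codeword.toList) :=
          (PySem.List.mem_enumerate_iff _ _ _).mpr ⟨k, by omega, rfl⟩
        have := h _ hmem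
        simp only [List.getElem_zip] at this
        rw [← inner_row word.toList codeword.toList k hk (by omega)]
        have hsimp : ((0 : Int) + (k : Nat)).toNat = k := by omega
        rw [hsimp] at this
        rw [getBang_eq _ k hk, getBang_eq _ k (by omega)]
        exact this
      · intro h p hp
        obtain ⟨k, hk, hpeq⟩ := (PySem.List.mem_enumerate_iff _ _ _).mp hp
        subst hpeq
        simp only [List.getElem_zip]
        have hsimp : ((0 : Int) + (k : Nat)).toNat = k := by omega
        rw [hsimp]
        rw [← getBang_eq _ k (by omega), ← getBang_eq _ k (by omega : k < codeword.toList.length)]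
        exact (inner_row word.toList codeword.toList k (by omega) (by omega)).mpr
          (h k (by omega))
    rw [key]
    constructor
    · intro h
      exact ⟨hlen, rows_to_match _ _ h⟩
    · intro h
      exact match_to_rows _ _ h.2
  · rw [if_pos (by simp only [PySem.Str.len_eq]; intro h; apply hlen; omega)]
    constructor
    · intro h; exact absurd h (by simp)
    · intro hM; exact absurd hM.1 hlen

theorem sameShape_iff (w cw : List Char) :
    pvSameShape w cw = true ↔ MatchRel w cw := by
  unfold pvSameShape MatchRel
  rw [Bool.and_eq_true, beq_iff_eq, List.all_eq_true]
  constructor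
  · rintro ⟨hlen, h⟩
    refine ⟨hlen, fun i hi j hj => ?_⟩
    have := h i (List.mem_range.mpr hi)
    rw [List.all_eq_true] at this
    have := this j (List.mem_range.mpr hj)
    rw [beq_iff_eq] at this
    constructor
    · intro hw; exact of_decide_eq_true (this ▸ decide_eq_true hw)
    · intro hc; exact of_decide_eq_true (this.symm ▸ decide_eq_true hc)
  · rintro ⟨hlen, h⟩
    refine ⟨hlen, fun i hi => ?_⟩
    rw [List.all_eq_true]
    intro j hj
    rw [beq_iff_eq]
    have := h i (List.mem_range.mp hi) j (List.mem_range.mp hj)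
    by_cases hw : w[j]! = w[i]!
    · rw [decide_eq_true hw, decide_eq_true (this.mp hw)]
    · rw [decide_eq_false hw, decide_eq_false (fun hc => hw (this.mpr hc))]

theorem dwm_eq_pattern (word codeword : String) :
    does_word_match word codeword = (pvPattern word.toList == pvPattern codeword.toList) := by
  have h1 := dwm_iff word codeword
  have h2 := pattern_eq_iff word.toList codeword.toList
  rw [Bool.eq_iff_iff, h1, beq_iff_eq, h2]

theorem dwm_eq_sameShape (word codeword : String) :
    does_word_match word codeword = pvSameShape word.toList codeword.toList := by
  rw [Bool.eq_iff_iff, dwm_iff, sameShape_iff]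

theorem loopAll_eq (cw : String) (matched ws : List String) :
    pvLoopAll cw matched ws = matched ++ ws.filter (fun w => does_word_match w cw) := by
  induction ws generalizing matched with
  | nil => simp [pvLoopAll]
  | cons w ws ih =>
    by_cases h : does_word_match w cw
    · simp [pvLoopAll, h, ih]
    · simp [pvLoopAll, h, ih]

theorem loopMax_eq (cw : String) (m : Int) (ws : List String) :
    ∀ matched : List String, (matched.length : Int) ≤ m →
      pvLoopMax cw m matched ws =
        matched ++ (ws.filter (fun w => does_word_match w cw)).take (m + 1 - matched.length).toNat := by
  induction ws with
  | nil => simp [pvLoopMax]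
  | cons w ws ih =>
    intro matched hm
    by_cases h : does_word_match w cw
    · by_cases hgt : ((matched ++ [w]).length : Int) > m
      · have hcap : (m + 1 - (matched.length : Int)).toNat = 1 := by
          simp at hgt; omega
        have hL : pvLoopMax cw m matched (w :: ws) = matched ++ [w] := by
          simp only [pvLoopMax, h, if_true]
          rw [if_pos hgt]
        rw [hL, hcap]
        simp [h]
      · have hlen : ((matched ++ [w]).length : Int) ≤ m := by omega
        have hstep : (m + 1 - (matched.length : Int)).toNat =
            (m + 1 - ((matched ++ [w]).length : Int)).toNat + 1 := by
          simp at hlen ⊢; omega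
        have hL : pvLoopMax cw m matched (w :: ws) = pvLoopMax cw m (matched ++ [w]) ws := by
          simp only [pvLoopMax, h, if_true]
          rw [if_neg hgt]
        rw [hL, ih (matched ++ [w]) hlen, hstep]
        simp [h, List.take_succ_cons]
    · simp [pvLoopMax, h, ih matched hm]

theorem count_eq_matched_length (cw : String) (ws : List String) :
    ws.countP (fun w => pvSameShape w.toList cw.toList) =
      (ws.filter (fun w => does_word_match w cw)).length := by
  rw [← List.countP_eq_length_filter]
  apply List.countP_congr
  intro w _
  rw [dwm_eq_sameShape]

theorem loopMax_empty (cw : String) (m : Int) (ws : List String)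
    (h : ws.filter (fun w => does_word_match w cw) = []) :
    ∀ acc, pvLoopMax cw m acc ws = acc := by
  induction ws with
  | nil => intro acc; simp [pvLoopMax]
  | cons w ws ih =>
    intro acc
    rw [List.filter_cons] at h
    by_cases hw : does_word_match w cw
    · simp [hw] at h
    · simp only [hw, Bool.false_eq_true, if_false] at h
      simp [pvLoopMax, hw, ih h]

-- ===== VERDICT (by name: the statement is the Claim_ definition above) =====
theorem get_matching_words_spec : Claim_unchanged_get_matching_words := by
  intro codeword wordlist maximum _ hpre hnd
  show get_matching_words codeword wordlist maximum = get_matching_words_alt codeword wordlist maximum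
  have hfilter : (fun w => does_word_match w codeword) =
      (fun w : String => pvPattern w.toList == pvPattern codeword.toList) :=
    funext fun w => dwm_eq_pattern w codeword
  unfold get_matching_words get_matching_words_alt
  by_cases hnil : wordlist = []
  · subst hnil
    cases maximum <;> simp [PySem.List.slice]
  · rw [if_neg hnil]
    cases maximum with
    | none =>
      show pvLoopAll codeword [] wordlist =
        wordlist.filter (fun w => pvPattern w.toList == pvPattern codeword.toList)
      rw [loopAll_eq, hfilter]
      simp
    | some m =>
      rcases lt_or_ge m 0 with hneg | hm
      · -- Pre_ then forces: no word matches, so both sides are []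
        have hcnt : wordlist.countP (fun w => pvSameShape w.toList codeword.toList) = 0 := by
          unfold Pre_get_matching_words at hpre
          rcases hpre with h | h
          · simp at h; omega
          · exact h
        rw [count_eq_matched_length] at hcnt
        have hmatched : wordlist.filter (fun w => does_word_match w codeword) = [] :=
          List.eq_nil_of_length_eq_zero hcnt
        show pvLoopMax codeword m [] wordlist =
          PySem.List.slice (wordlist.filter (fun w => pvPattern w.toList == pvPattern codeword.toList)) none (some m)
        rw [loopMax_empty codeword m wordlist hmatched, ← hfilter, hmatched]
        simp [PySem.List.slice]
      have hcnt : (wordlist.countP (fun w => pvSameShape w.toList codeword.toList) : Int) ≤ m := by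
        unfold D_get_matching_words at hnd
        simp only [not_and, not_lt, ne_eq] at hnd
        simpa using hnd (by simp) (by simpa using hm)
      rw [count_eq_matched_length] at hcnt
      show pvLoopMax codeword m [] wordlist =
        PySem.List.slice (wordlist.filter (fun w => pvPattern w.toList == pvPattern codeword.toList)) none (some m)
      rw [PySem.List.slice_to _ hm, ← hfilter,
        loopMax_eq codeword m wordlist [] (by simp; exact hm)]
      set matched := wordlist.filter (fun w => does_word_match w codeword) with hmdef
      have hlen : (matched.length : Int) ≤ m := hcnt
      have h1 : matched.take (m + 1 - ((List.nil (α := String)).length : Int)).toNat = matched := by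
        apply List.take_of_length_le
        simp; omega
      have h2 : matched.take m.toNat = matched := by
        apply List.take_of_length_le
        omega
      rw [h1, h2]
      simp

theorem get_matching_words_changed : Claim_changed_get_matching_words := by
  unfold Claim_changed_get_matching_words; decide

theorem get_matching_words_tight : Claim_exact_get_matching_words := by
  intro codeword wordlist maximum _ hpre hd heq
  obtain ⟨hne, hm0, hlt⟩ := hd
  cases maximum with
  | none => exact hne rfl
  | some m =>
    have hm : 0 ≤ m := by simpa using hm0
    simp only [Option.getD_some] at hlt
    rw [count_eq_matched_length] at hlt
    set matched := wordlist.filter (fun w => does_word_match w codeword) with hmdef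
    have hnil : wordlist ≠ [] := by
      intro h; subst h; simp [hmdef] at hlt; omega
    have hfilter : (fun w => does_word_match w codeword) =
        (fun w : String => pvPattern w.toList == pvPattern codeword.toList) :=
      funext fun w => dwm_eq_pattern w codeword
    have hA : get_matching_words codeword wordlist (some m) =
        matched.take (m + 1).toNat := by
      unfold get_matching_words
      rw [if_neg hnil]
      show pvLoopMax codeword m [] wordlist = matched.take (m + 1).toNat
      rw [loopMax_eq codeword m wordlist [] (by simp; exact hm), hmdef]
      simp
    have hB : get_matching_words_alt codeword wordlist (some m) =
        matched.take m.toNat := by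
      unfold get_matching_words_alt
      show PySem.List.slice (wordlist.filter (fun w => pvPattern w.toList == pvPattern codeword.toList)) none (some m) = matched.take m.toNat
      rw [PySem.List.slice_to _ hm, hmdef, hfilter]
    rw [hA, hB] at heq
    have := congrArg List.length heq
    rw [List.length_take, List.length_take] at this
    omega
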